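-- pv_equiv track=rewrite | github.com/ellull/adventofcode-2022 | day8.py | visibility_mask
-- ===== SOURCE A (Python) =====
-- from typing import List
--
-- def visibility_mask(tree_line: List[int]) -> List[bool]:
--     mask = []
--     tallest_tree = -1
--     for tree in tree_line:
--         if tree > tallest_tree:
--             mask.append(True)
--             tallest_tree = tree
--         else:
--             mask.append(False)
--     return mask
-- ===== SOURCE B (Python) =====
-- from typing import List
--
-- def visibility_mask(tree_line: List[int]) -> List[bool]:
--     return [t > max([-1] + tree_line[:i]) for i, t in enumerate(tree_line)]
-- ===== Notes on version B (the rewrite author's own statement) =====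
-- stated objective: simpler
-- what changed: Replaces the stateful append/update loop with a one-line closed-form comprehension: a tree is visible iff it strictly exceeds the maximum of the sentinel together with all earlier trees (quadratic, traded for brevity).
import Mathlib
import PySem

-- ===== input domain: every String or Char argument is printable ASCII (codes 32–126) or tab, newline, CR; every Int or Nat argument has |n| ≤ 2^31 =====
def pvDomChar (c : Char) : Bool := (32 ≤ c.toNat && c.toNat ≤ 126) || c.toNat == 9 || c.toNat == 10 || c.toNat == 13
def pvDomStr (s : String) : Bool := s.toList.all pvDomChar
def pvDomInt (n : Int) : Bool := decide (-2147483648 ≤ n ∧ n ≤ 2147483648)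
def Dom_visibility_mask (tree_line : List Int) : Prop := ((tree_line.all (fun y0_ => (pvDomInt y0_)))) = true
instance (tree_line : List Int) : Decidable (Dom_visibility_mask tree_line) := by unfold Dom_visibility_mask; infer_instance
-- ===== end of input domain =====

-- B replaces A's stateful running-max loop with a closed-form comprehension (simpler, not faster).

-- ===== PORT A =====
def visibility_mask (tree_line : List Int) : List Bool :=
  (tree_line.foldl
    (fun (s : List Bool × Int) tree =>
      if tree > s.2 then (s.1 ++ [true], tree) else (s.1 ++ [false], s.2))
    ([], -1)).1

-- ===== PORT B =====
-- Python: a comprehension over enumerate; max of the sentinel-prefixed slice is a foldl of max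
-- starting from the sentinel, which is exact for Python's max on a nonempty int list.
def visibility_mask_alt (tree_line : List Int) : List Bool :=
  (PySem.List.enumerate tree_line 0).map
    (fun p => decide (p.2 > (PySem.List.slice tree_line none (some p.1)).foldl max (-1)))

-- ===== PRECONDITION & SPEC =====
def Spec_visibility_mask (tree_line : List Int) (out : List Bool) : Prop := out = visibility_mask_alt tree_line
instance (tree_line : List Int) (out : List Bool) : Decidable (Spec_visibility_mask tree_line out) := by unfold Spec_visibility_mask; infer_instance

-- ===== CLAIM (what is proved, stated in full; the proofs are below) =====
def Claim_equal_visibility_mask : Prop := ∀ (tree_line : List Int), Dom_visibility_mask tree_line → Spec_visibility_mask tree_line (visibility_mask tree_line)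

-- ===== LEMMAS AND PROOFS =====

/-- Reference recursion: mask relative to a running maximum `m`. -/
def visAux (m : Int) : List Int → List Bool
  | [] => []
  | t :: ts => decide (t > m) :: visAux (max m t) ts

theorem visibility_mask_foldl (l : List Int) : ∀ (acc : List Bool) (m : Int),
    (l.foldl
      (fun (s : List Bool × Int) tree =>
        if tree > s.2 then (s.1 ++ [true], tree) else (s.1 ++ [false], s.2))
      (acc, m)).1 = acc ++ visAux m l := by
  induction l with
  | nil => intro acc m; simp [visAux]
  | cons t ts ih =>
    intro acc m
    by_cases h : t > m
    · have hm : max m t = t := max_eq_right (le_of_lt h)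
      simp [List.foldl, h, ih, visAux, hm]
    · have hm : max m t = m := max_eq_left (not_lt.mp h)
      simp [List.foldl, h, ih, visAux, hm]

theorem visAux_getElem? (l : List Int) : ∀ (m : Int) (k : Nat),
    (visAux m l)[k]? = l[k]?.map (fun x => decide (x > (l.take k).foldl max m)) := by
  induction l with
  | nil => intro m k; simp [visAux]
  | cons t ts ih =>
    intro m k
    cases k with
    | zero => simp [visAux]
    | succ k => simp [visAux, ih]

theorem visibility_mask_alt_getElem? (l : List Int) (k : Nat) :
    (visibility_mask_alt l)[k]? = l[k]?.map (fun x => decide (x > (l.take k).foldl max (-1))) := by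
  unfold visibility_mask_alt
  rw [List.getElem?_map, PySem.List.getElem?_enumerate]
  have hs : ((0 : Int) + (k : Nat)) = ((k : Nat) : Int) := by ring
  cases h : l[k]? with
  | none => simp
  | some x => simp [hs, PySem.List.slice_to_natCast]

-- ===== VERDICT (by name: the statement is the Claim_ definition above) =====
theorem visibility_mask_spec : Claim_equal_visibility_mask := by
  intro l _
  show visibility_mask l = visibility_mask_alt l
  have hA : visibility_mask l = visAux (-1) l := by
    unfold visibility_mask; rw [visibility_mask_foldl]; simp
  rw [hA]
  apply List.ext_getElem?
  intro k
  rw [visAux_getElem? l (-1) k, visibility_mask_alt_getElem? l k]
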